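-- pv_equiv track=rewrite | github.com/KubeOperator/KubeOperator | core/apps/kubeops_api/cloud_provider.py | create_cluster_scale_up_hosts_dict
-- ===== SOURCE A (Python) =====
-- def create_cluster_scale_up_hosts_dict(hosts_dict):
--     change_list = []
--     worker_hosts_dict = list(filter(is_worker, hosts_dict))
--     master_hosts_dict = list(filter(is_master, hosts_dict))
--     for host_dict in hosts_dict:
--         if host_dict.get('new', None):
--             change_list.append(host_dict)
--     hosts_dict = []
--     hosts_dict.extend(master_hosts_dict)
--     hosts_dict.extend(worker_hosts_dict)
--     return {
--         "hosts_dict": hosts_dict,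
--         "change_list": change_list
--     }
--
-- def is_worker(host):
--     return host['role'] == 'worker'
--
-- def is_master(host):
--     return host['role'] == 'master'
-- ===== SOURCE B (Python) =====
-- def create_cluster_scale_up_hosts_dict(hosts_dict):
--     master_hosts, worker_hosts, change_list = [], [], []
--     for host in hosts_dict:
--         role = host['role']
--         if role == 'master':
--             master_hosts.append(host)
--         elif role == 'worker':
--             worker_hosts.append(host)
--         if host.get('new'):
--             change_list.append(host)
--     return {"hosts_dict": master_hosts + worker_hosts, "change_list": change_list}
-- ===== Notes on version B (the rewrite author's own statement) =====
-- stated objective: simpler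
-- what changed: Replaces A's two filter passes plus a separate loop with a single pass that appends each host to the master/worker/change lists as it goes, then concatenates masters before workers.
import Mathlib
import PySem

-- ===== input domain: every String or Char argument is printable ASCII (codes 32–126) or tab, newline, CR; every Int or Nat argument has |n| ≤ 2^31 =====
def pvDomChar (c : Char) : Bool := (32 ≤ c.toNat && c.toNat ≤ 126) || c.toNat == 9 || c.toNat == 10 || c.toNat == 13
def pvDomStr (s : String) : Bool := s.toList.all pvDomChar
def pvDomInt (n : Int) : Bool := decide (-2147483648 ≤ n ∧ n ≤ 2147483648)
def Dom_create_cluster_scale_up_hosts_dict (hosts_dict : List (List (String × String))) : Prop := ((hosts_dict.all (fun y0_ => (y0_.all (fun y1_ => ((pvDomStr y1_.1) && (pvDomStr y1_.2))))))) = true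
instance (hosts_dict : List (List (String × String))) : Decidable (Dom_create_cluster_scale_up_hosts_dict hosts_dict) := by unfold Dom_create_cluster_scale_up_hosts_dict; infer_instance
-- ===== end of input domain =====

-- B replaces A's two filter passes plus a separate loop with one pass building all three lists (objective: simpler).

-- ===== PORT A =====
def is_worker (host : List (String × String)) : Bool :=
  (PySem.Dict.mk host).get? "role" == some "worker"

def is_master (host : List (String × String)) : Bool :=
  (PySem.Dict.mk host).get? "role" == some "master"

def create_cluster_scale_up_hosts_dict (hosts_dict : List (List (String × String))) : List (String × List (List (String × String))) :=
  let change_list : List (List (String × String)) :=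
    hosts_dict.foldl (fun acc h =>
      if ((PySem.Dict.mk h).get? "new").getD "" ≠ "" then acc ++ [h] else acc) []
  let worker_hosts_dict := hosts_dict.filter is_worker
  let master_hosts_dict := hosts_dict.filter is_master
  let hosts_dict' := ([] : List (List (String × String))) ++ master_hosts_dict ++ worker_hosts_dict
  [("hosts_dict", hosts_dict'), ("change_list", change_list)]

-- ===== PORT B =====
def altLoop : List (List (String × String)) → List (List (String × String)) → List (List (String × String)) → List (List (String × String)) →
    List (List (String × String)) × List (List (String × String)) × List (List (String × String))
  | [], m, w, c => (m, w, c)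
  | h :: t, m, w, c =>
    let role := ((PySem.Dict.mk h).get? "role").getD ""
    let m' := if role == "master" then m ++ [h] else m
    let w' := if role != "master" && role == "worker" then w ++ [h] else w
    let c' := if ((PySem.Dict.mk h).get? "new").getD "" ≠ "" then c ++ [h] else c
    altLoop t m' w' c'

def create_cluster_scale_up_hosts_dict_alt (hosts_dict : List (List (String × String))) : List (String × List (List (String × String))) :=
  let (m, w, c) := altLoop hosts_dict [] [] []
  [("hosts_dict", m ++ w), ("change_list", c)]

-- ===== PRECONDITION & SPEC =====
-- Pre_ excludes exactly the hosts_dict containing a host without a 'role' key: there Python A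
-- (and B) raises KeyError at host['role'].
def Pre_create_cluster_scale_up_hosts_dict (hosts_dict : List (List (String × String))) : Prop :=
  ∀ h ∈ hosts_dict, (PySem.Dict.mk h).contains "role" = true
instance (hosts_dict : List (List (String × String))) : Decidable (Pre_create_cluster_scale_up_hosts_dict hosts_dict) := by unfold Pre_create_cluster_scale_up_hosts_dict; infer_instance

def pvWitness_create_cluster_scale_up_hosts_dict : (List (List (String × String))) :=
  [[("role", "master"), ("new", "1")], [("role", "worker")], [("role", "other"), ("new", "x")]]

def Spec_create_cluster_scale_up_hosts_dict (hosts_dict : List (List (String × String))) (out : List (String × List (List (String × String)))) : Prop := out = create_cluster_scale_up_hosts_dict_alt hosts_dict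
instance (hosts_dict : List (List (String × String))) (out : List (String × List (List (String × String)))) : Decidable (Spec_create_cluster_scale_up_hosts_dict hosts_dict out) := by unfold Spec_create_cluster_scale_up_hosts_dict; infer_instance

-- ===== CLAIM (what is proved, stated in full; the proofs are below) =====
def Claim_equal_create_cluster_scale_up_hosts_dict : Prop := ∀ (hosts_dict : List (List (String × String))), Dom_create_cluster_scale_up_hosts_dict hosts_dict → Pre_create_cluster_scale_up_hosts_dict hosts_dict → Spec_create_cluster_scale_up_hosts_dict hosts_dict (create_cluster_scale_up_hosts_dict hosts_dict)

-- ===== LEMMAS AND PROOFS =====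

-- B's single loop accumulates exactly A's three per-role/change sublists.
lemma altLoop_eq (hs : List (List (String × String)))
    (m w c : List (List (String × String))) :
    altLoop hs m w c =
      (m ++ hs.filter is_master, w ++ hs.filter is_worker,
       c ++ hs.filter (fun h => ((PySem.Dict.mk h).get? "new").getD "" ≠ "")) := by
  induction hs generalizing m w c with
  | nil => simp [altLoop]
  | cons h t ih =>
    simp only [altLoop, ih, List.filter_cons]
    have hm : is_master h = (((PySem.Dict.mk h).get? "role").getD "" == "master") := by
      simp only [is_master]
      cases hr : (PySem.Dict.mk h).get? "role" with
      | none => simp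
      | some v => simp
    have hw : is_worker h =
        (((PySem.Dict.mk h).get? "role").getD "" != "master" &&
         ((PySem.Dict.mk h).get? "role").getD "" == "worker") := by
      simp only [is_worker]
      cases hr : (PySem.Dict.mk h).get? "role" with
      | none => simp
      | some v =>
        simp only [Option.getD_some]
        by_cases hv : v = "worker" <;> simp [hv]
    rw [hm, hw]
    by_cases h1 : (((PySem.Dict.mk h).get? "role").getD "" == "master") = true <;>
      by_cases h2 : (((PySem.Dict.mk h).get? "role").getD "" != "master" &&
         ((PySem.Dict.mk h).get? "role").getD "" == "worker") = true <;>
      by_cases h3 : ((PySem.Dict.mk h).get? "new").getD "" ≠ "" <;>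
        simp [h1, h2, h3]

-- ===== VERDICT (by name: the statement is the Claim_ definition above) =====
theorem create_cluster_scale_up_hosts_dict_spec : Claim_equal_create_cluster_scale_up_hosts_dict := by
  intro hosts_dict _ _
  unfold Spec_create_cluster_scale_up_hosts_dict
  unfold create_cluster_scale_up_hosts_dict create_cluster_scale_up_hosts_dict_alt
  rw [altLoop_eq, PySem.List.foldl_append_ite_eq_filter]
  simp
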